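-- pv_equiv track=rewrite | github.com/ussherk03/Rex-Lignum | Testing.py | find_mult_3
-- ===== SOURCE A (Python) =====
-- import itertools
--
-- def find_mult_3(num):
--     string = ''.join(str(num))
--     length_of_string = len(string)
--     axe = []
--     x = 1
--     while x <= length_of_string:
--         i = list(itertools.permutations(string, x))
--         for iterable in i:
--             axe.append(''.join(iterable))
--         x +=1
--
--     integers = [int(y) for y in axe]
--     multiples_3 = list(itertools.filterfalse(lambda e:e%3, integers))
--     result = []
--     result[len(result):] = len(multiples_3), multiples_3[-1]
--     return result
-- ===== SOURCE B (Python) =====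
-- def _choices(rest):
--     # all ways to pick one character of rest: (picked, remaining), in position order
--     if not rest:
--         return []
--     c, tail = rest[0], rest[1:]
--     return [(c, tail)] + [(d, c + r) for d, r in _choices(tail)]
--
--
-- def find_mult_3(num):
--     # one breadth-first pass over partial permutations, fusing the count and the
--     # last multiple of 3 into the traversal (no intermediate result lists)
--     s = str(num)
--     count = 0
--     last = None
--     level = [("", s)]
--     for _ in s:
--         nxt = []
--         for pre, rest in level:
--             for c, rem in _choices(rest):
--                 t = pre + c
--                 v = int(t)
--                 if v % 3 == 0:
--                     count += 1
--                     last = v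
--                 nxt.append((t, rem))
--         level = nxt
--     return [count, last]
-- ===== Notes on version B (the rewrite author's own statement) =====
-- stated objective: alternative
-- what changed: A materialises every k-permutation string via itertools per length, then builds an int list, filters it with filterfalse and slice-assigns the result; B does one breadth-first pass over (prefix, remaining) partial permutations with a small recursive chooser, fusing the count and the last multiple of 3 into the traversal with no intermediate result lists.
import Mathlib
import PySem

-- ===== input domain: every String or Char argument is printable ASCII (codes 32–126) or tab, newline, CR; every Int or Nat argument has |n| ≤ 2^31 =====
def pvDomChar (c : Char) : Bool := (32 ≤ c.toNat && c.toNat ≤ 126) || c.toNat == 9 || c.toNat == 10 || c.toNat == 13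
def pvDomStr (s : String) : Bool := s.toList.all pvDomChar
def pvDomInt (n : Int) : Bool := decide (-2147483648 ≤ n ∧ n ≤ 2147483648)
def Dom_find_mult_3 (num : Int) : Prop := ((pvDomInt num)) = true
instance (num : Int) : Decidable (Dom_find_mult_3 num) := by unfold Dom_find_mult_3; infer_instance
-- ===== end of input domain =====

-- B replaces A's four passes (itertools.permutations per length, list of strings, int() list,
-- filterfalse, slice-assignment) by one breadth-first pass over partial permutations that fuses
-- the count and the last multiple of 3 into the traversal (objective: alternative, not faster).

-- ===== PORT A =====
def find_mult_3 (num : Int) : List Int :=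
  let string := PySem.Int.toChars num        -- ''.join(str(num)) = str(num), as its character list
  let length_of_string := PySem.List.len string
  -- while x <= length_of_string: for t in itertools.permutations(string, x): axe.append(''.join(t))
  let axe := (PySem.List.pyRange 1 (length_of_string + 1) 1).foldl
      (fun axe x => axe ++ PySem.List.permutations string x.toNat) []
  let integers := axe.map (fun y => (PySem.Int.ofChars? y).getD 0)   -- int(y); succeeds on every input Pre_ admits
  let multiples_3 := integers.filter (fun e => PySem.Int.mod e 3 == 0)
  match PySem.List.pyGet? multiples_3 (-1) with
  | none => []                               -- multiples_3[-1]: IndexError, excluded by Pre_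
  | some m => [PySem.List.len multiples_3, m]

-- ===== PORT B =====
-- _choices(rest): (rest[0], rest[1:]) consed onto the choices of the tail with the head restored
def pvChoices : List Char → List (Char × List Char)
  | [] => []
  | c :: tail => (c, tail) :: (pvChoices tail).map (fun dr => (dr.1, c :: dr.2))

-- body of 'for c, rem in _choices(rest)': count/last update and nxt.append((t, rem))
def pvInner (pre : List Char) (acc : (Int × Option Int) × List (List Char × List Char))
    (cr : Char × List Char) : (Int × Option Int) × List (List Char × List Char) :=
  let t := pre ++ [cr.1]
  let v := (PySem.Int.ofChars? t).getD 0     -- int(t); succeeds on every input Pre_ admits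
  let cl := if PySem.Int.mod v 3 == 0 then (acc.1.1 + 1, some v) else acc.1
  (cl, acc.2 ++ [(t, cr.2)])

-- body of 'for pre, rest in level'
def pvMiddle (acc : (Int × Option Int) × List (List Char × List Char))
    (pr : List Char × List Char) : (Int × Option Int) × List (List Char × List Char) :=
  (pvChoices pr.2).foldl (pvInner pr.1) acc

-- body of 'for _ in s': start a fresh nxt, sweep the level
def pvOuter (st : (Int × Option Int) × List (List Char × List Char)) (_ : Char) :
    (Int × Option Int) × List (List Char × List Char) :=
  st.2.foldl pvMiddle (st.1, [])

def find_mult_3_alt (num : Int) : List Int :=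
  let s := PySem.Int.toChars num
  let fin := s.foldl pvOuter ((0, none), [([], s)])
  [fin.1.1, fin.1.2.getD 0]                  -- 'last' is still None only outside Pre_

-- ===== PRECONDITION & SPEC =====
-- Pre_ is exactly the set of inputs on which A returns: num ≥ 0 (str of a negative contains '-',
-- so some int(y) raises ValueError), and some selection of digits sums to a multiple of 3 —
-- equivalently, by digit residue classes: a digit in {0,3,6,9}, or one in {1,4,7} and one in
-- {2,5,8}, or three in {1,4,7}, or three in {2,5,8} (otherwise multiples_3[-1] raises IndexError).
def Pre_find_mult_3 (num : Int) : Prop :=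
  0 ≤ num ∧
  (1 ≤ (PySem.Int.toChars num).countP (fun c => ['0','3','6','9'].contains c) ∨
   (1 ≤ (PySem.Int.toChars num).countP (fun c => ['1','4','7'].contains c) ∧
    1 ≤ (PySem.Int.toChars num).countP (fun c => ['2','5','8'].contains c)) ∨
   3 ≤ (PySem.Int.toChars num).countP (fun c => ['1','4','7'].contains c) ∨
   3 ≤ (PySem.Int.toChars num).countP (fun c => ['2','5','8'].contains c))
instance (num : Int) : Decidable (Pre_find_mult_3 num) := by unfold Pre_find_mult_3; infer_instance
def pvWitness_find_mult_3 : Int := 12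

def Spec_find_mult_3 (num : Int) (out : List Int) : Prop := out = find_mult_3_alt num
instance (num : Int) (out : List Int) : Decidable (Spec_find_mult_3 num out) := by unfold Spec_find_mult_3; infer_instance

-- ===== CLAIM (what is proved, stated in full; the proofs are below) =====
def Claim_equal_find_mult_3 : Prop := ∀ (num : Int), Dom_find_mult_3 num → Pre_find_mult_3 num → Spec_find_mult_3 num (find_mult_3 num)

-- ===== LEMMAS AND PROOFS =====

-- spec-level abbreviations
def pvParse (y : List Char) : Int := (PySem.Int.ofChars? y).getD 0
def pvP (e : Int) : Bool := PySem.Int.mod e 3 == 0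
-- one BFS expansion step of a level
def pvExpand (lvl : List (List Char × List Char)) : List (List Char × List Char) :=
  lvl.flatMap (fun pr => (pvChoices pr.2).map (fun cr => (pr.1 ++ [cr.1], cr.2)))
-- depth-first form of the k-th level
def pvDFS (s : List Char) : Nat → List (List Char × List Char)
  | 0 => [([], s)]
  | k+1 => (pvChoices s).flatMap (fun cr => (pvDFS cr.2 k).map (fun pr => (cr.1 :: pr.1, pr.2)))
def pvLvlVals (s : List Char) (k : Nat) : List Int := (PySem.List.permutations s k).map pvParse
def pvVals (s : List Char) (j : Nat) : List Int := (List.range j).flatMap (fun i => pvLvlVals s (i+1))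
def pvNewVals (lvl : List (List Char × List Char)) : List Int := (pvExpand lvl).map (fun pr => pvParse pr.1)

theorem pv_choices_flatMap {β : Type} (s : List Char) (F : Char → List Char → List β) :
    (List.range s.length).flatMap (fun i => F (s.getD i default) (s.eraseIdx i))
    = (pvChoices s).flatMap (fun cr => F cr.1 cr.2) := by
  induction s generalizing F with
  | nil => simp [pvChoices]
  | cons c s ih =>
    simp only [List.length_cons, List.range_succ_eq_map, List.flatMap_cons, List.flatMap_map,
      List.getD_cons_zero, List.eraseIdx_cons_zero, pvChoices]
    congr 1
    have := ih (fun d r => F d (c :: r))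
    simpa [List.flatMap_map, List.eraseIdx_cons_succ, List.getD_cons_succ] using this

theorem pv_perms_succ_getD (s : List Char) (k : Nat) :
    PySem.List.permutations s (k+1)
    = (List.range s.length).flatMap
        (fun i => (PySem.List.permutations (s.eraseIdx i) k).map (fun p => s.getD i default :: p)) := by
  rw [PySem.List.permutations_succ]
  rw [List.flatMap_def, List.flatMap_def]
  congr 1
  refine List.map_congr_left (fun i hi => ?_)
  have hlt : i < s.length := List.mem_range.mp hi
  rw [List.getElem?_eq_getElem hlt]
  rw [List.getD_eq_getElem s default hlt]

theorem pv_map_fst_DFS (k : Nat) : ∀ (s : List Char),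
    (pvDFS s k).map Prod.fst = PySem.List.permutations s k := by
  induction k with
  | zero => intro s; simp [pvDFS, PySem.List.permutations_zero]
  | succ k ih =>
    intro s
    rw [pv_perms_succ_getD,
      pv_choices_flatMap s (fun c rest => (PySem.List.permutations rest k).map (fun p => c :: p))]
    simp only [pvDFS, List.map_flatMap, List.map_map]
    refine List.flatMap_congr (fun cr _ => ?_)
    rw [← ih cr.2]
    simp [List.map_map, Function.comp_def]

theorem pv_expand_map_cons (a : Char) (lvl : List (List Char × List Char)) :
    pvExpand (lvl.map (fun pr => (a :: pr.1, pr.2))) = (pvExpand lvl).map (fun pr => (a :: pr.1, pr.2)) := by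
  simp [pvExpand, List.flatMap_map, List.map_flatMap, List.map_map, Function.comp_def]

theorem pv_expand_DFS (k : Nat) : ∀ (s : List Char), pvExpand (pvDFS s k) = pvDFS s (k+1) := by
  induction k with
  | zero =>
    intro s
    show pvExpand [([], s)] = pvDFS s 1
    simp only [pvDFS, pvExpand, List.flatMap_cons, List.flatMap_nil, List.map_nil,
      List.map_cons, List.nil_append, List.append_nil]
    generalize pvChoices s = L
    induction L with
    | nil => rfl
    | cons a L ihL => simp [ihL]
  | succ k ih =>
    intro s
    show pvExpand (pvDFS s (k+1)) = pvDFS s (k+2)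
    simp only [pvDFS, pvExpand, List.flatMap_assoc]
    refine List.flatMap_congr (fun cr _ => ?_)
    have h1 : ((pvDFS cr.2 k).map (fun pr => (cr.1 :: pr.1, pr.2))).flatMap
        (fun pr => (pvChoices pr.2).map (fun cr2 => (pr.1 ++ [cr2.1], cr2.2)))
        = pvExpand ((pvDFS cr.2 k).map (fun pr => (cr.1 :: pr.1, pr.2))) := rfl
    rw [h1, pv_expand_map_cons, ih cr.2]
    rfl

theorem pv_or_some (X : Option Int) (v : Int) (l : Option Int) :
    X.or (some v) = (some (X.getD v)).or l := by cases X <;> rfl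

theorem pv_foldInner (pre : List Char) (crs : List (Char × List Char)) (c : Int) (l : Option Int)
    (out : List (List Char × List Char)) :
    crs.foldl (pvInner pre) ((c, l), out)
    = ((c + ((crs.map (fun cr => pvParse (pre ++ [cr.1]))).countP pvP : Nat),
        (((crs.map (fun cr => pvParse (pre ++ [cr.1]))).filter pvP).getLast?).or l),
       out ++ crs.map (fun cr => (pre ++ [cr.1], cr.2))) := by
  induction crs generalizing c l out with
  | nil => simp
  | cons cr crs ih =>
    simp only [List.foldl_cons, List.map_cons, List.countP_cons, List.filter_cons]
    by_cases hp : pvP (pvParse (pre ++ [cr.1]))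
    · have hstep : pvInner pre ((c, l), out) cr
          = ((c + 1, some (pvParse (pre ++ [cr.1]))), out ++ [(pre ++ [cr.1], cr.2)]) := by
        simp only [pvInner, pvP, pvParse] at hp ⊢
        rw [if_pos hp]
      rw [hstep, ih]
      simp only [hp, if_pos, Prod.mk.injEq]
      refine ⟨⟨by push_cast; ring, ?_⟩, by simp [List.append_assoc]⟩
      rw [List.getLast?_cons]
      exact pv_or_some _ _ _
    · have hstep : pvInner pre ((c, l), out) cr = ((c, l), out ++ [(pre ++ [cr.1], cr.2)]) := by
        simp only [pvInner, pvP, pvParse] at hp ⊢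
        rw [if_neg hp]
      rw [hstep, ih]
      simp [hp, List.append_assoc]

theorem pv_foldMiddle (lvl : List (List Char × List Char)) (c : Int) (l : Option Int)
    (out : List (List Char × List Char)) :
    lvl.foldl pvMiddle ((c, l), out)
    = ((c + ((pvNewVals lvl).countP pvP : Nat),
        (((pvNewVals lvl).filter pvP).getLast?).or l),
       out ++ pvExpand lvl) := by
  induction lvl generalizing c l out with
  | nil => simp [pvNewVals, pvExpand]
  | cons pr lvl ih =>
    simp only [List.foldl_cons]
    have hmid : pvMiddle ((c, l), out) pr = (pvChoices pr.2).foldl (pvInner pr.1) ((c, l), out) := rfl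
    rw [hmid, pv_foldInner, ih]
    have hexp : pvExpand (pr :: lvl)
        = (pvChoices pr.2).map (fun cr => (pr.1 ++ [cr.1], cr.2)) ++ pvExpand lvl := by
      simp [pvExpand]
    have hnv : pvNewVals (pr :: lvl)
        = ((pvChoices pr.2).map (fun cr => pvParse (pr.1 ++ [cr.1]))) ++ pvNewVals lvl := by
      simp [pvNewVals, hexp, List.map_map, Function.comp_def]
    rw [hnv, hexp]
    simp only [List.countP_append, List.filter_append, List.getLast?_append, Prod.mk.injEq]
    exact ⟨⟨by push_cast; ring, by rw [Option.or_assoc]⟩, by simp [List.append_assoc]⟩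

theorem pv_outer_iter (s : List Char) (xs : List Char) : ∀ (j : Nat),
    xs.foldl pvOuter ((((pvVals s j).countP pvP : Int), ((pvVals s j).filter pvP).getLast?), pvDFS s j)
    = ((((pvVals s (j + xs.length)).countP pvP : Int), ((pvVals s (j + xs.length)).filter pvP).getLast?),
       pvDFS s (j + xs.length)) := by
  induction xs with
  | nil => intro j; simp
  | cons x xs ih =>
    intro j
    simp only [List.foldl_cons, List.length_cons]
    have hstep : pvOuter ((((pvVals s j).countP pvP : Int), ((pvVals s j).filter pvP).getLast?), pvDFS s j) x
        = ((((pvVals s (j+1)).countP pvP : Int), ((pvVals s (j+1)).filter pvP).getLast?), pvDFS s (j+1)) := by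
      show (pvDFS s j).foldl pvMiddle ((((pvVals s j).countP pvP : Int), ((pvVals s j).filter pvP).getLast?), [])
          = _
      rw [pv_foldMiddle]
      have hnv : pvNewVals (pvDFS s j) = pvLvlVals s (j+1) := by
        have h0 : pvNewVals (pvDFS s j) = (pvExpand (pvDFS s j)).map (fun pr => pvParse pr.1) := rfl
        rw [h0, pv_expand_DFS]
        have h2 : (pvDFS s (j+1)).map (fun pr => pvParse pr.1)
            = ((pvDFS s (j+1)).map Prod.fst).map pvParse := by
          simp [List.map_map, Function.comp_def]
        rw [h2, pv_map_fst_DFS]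
        rfl
      have hv : pvVals s (j+1) = pvVals s j ++ pvLvlVals s (j+1) := by
        simp [pvVals, List.range_succ]
      rw [hnv, hv, pv_expand_DFS]
      simp only [List.countP_append, List.filter_append, List.getLast?_append, List.nil_append]
      rw [Prod.mk.injEq, Prod.mk.injEq]
      exact ⟨⟨by push_cast; ring, rfl⟩, rfl⟩
    rw [hstep]
    have := ih (j+1)
    rw [this]
    have harith : j + 1 + xs.length = j + (xs.length + 1) := by omega
    rw [harith]

theorem pv_B_eq (num : Int) :
    find_mult_3_alt num
    = [((pvVals (PySem.Int.toChars num) (PySem.Int.toChars num).length).countP pvP : Int),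
       (((pvVals (PySem.Int.toChars num) (PySem.Int.toChars num).length).filter pvP).getLast?).getD 0] := by
  have key := pv_outer_iter (PySem.Int.toChars num) (PySem.Int.toChars num) 0
  have h0 : pvVals (PySem.Int.toChars num) 0 = [] := rfl
  rw [h0] at key
  simp only [List.countP_nil, List.filter_nil, List.getLast?_nil, Nat.cast_zero, Nat.zero_add] at key
  show [((PySem.Int.toChars num).foldl pvOuter ((0, none), [([], PySem.Int.toChars num)])).1.1,
        ((PySem.Int.toChars num).foldl pvOuter ((0, none), [([], PySem.Int.toChars num)])).1.2.getD 0] = _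
  have hdfs : pvDFS (PySem.Int.toChars num) 0 = [([], PySem.Int.toChars num)] := rfl
  rw [← hdfs, key]

theorem pv_A_eq (num : Int) :
    find_mult_3 num
    = match ((pvVals (PySem.Int.toChars num) (PySem.Int.toChars num).length).filter pvP).getLast? with
      | none => []
      | some m => [(((pvVals (PySem.Int.toChars num) (PySem.Int.toChars num).length).filter pvP).length : Int), m] := by
  simp only [find_mult_3]
  have hlen : PySem.List.len (PySem.Int.toChars num) = ((PySem.Int.toChars num).length : Int) :=
    PySem.List.len_eq _
  rw [hlen, PySem.List.pyRange_one]
  have htn : ((((PySem.Int.toChars num).length : Int) + 1) - 1).toNat = (PySem.Int.toChars num).length := by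
    omega
  rw [htn, List.foldl_map, PySem.List.foldl_append_eq_flatMap, List.nil_append]
  have hfun : (fun (k : Nat) => PySem.List.permutations (PySem.Int.toChars num) ((1 + (k : Int)).toNat))
      = fun (k : Nat) => PySem.List.permutations (PySem.Int.toChars num) (k + 1) := by
    funext k
    congr 1
    omega
  rw [hfun]
  have hparse : (fun y => (PySem.Int.ofChars? y).getD 0) = pvParse := rfl
  have hpp : (fun (e : Int) => PySem.Int.mod e 3 == 0) = pvP := rfl
  rw [hparse, hpp, List.map_flatMap]
  have hvals : (List.range (PySem.Int.toChars num).length).flatMap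
      (fun k => List.map pvParse (PySem.List.permutations (PySem.Int.toChars num) (k + 1)))
      = pvVals (PySem.Int.toChars num) (PySem.Int.toChars num).length := rfl
  rw [hvals, PySem.List.pyGet?_neg_one]
  cases hlast : ((pvVals (PySem.Int.toChars num) (PySem.Int.toChars num).length).filter pvP).getLast? with
  | none => rfl
  | some m => simp [PySem.List.len_eq]

-- existence of a multiple of 3 among the enumerated values, from Pre_
theorem pv_mem_perms_cons (r : Nat) : ∀ (xs : List Char) (c : Char) (p : List Char),
    p ∈ PySem.List.permutations xs r → p ∈ PySem.List.permutations (c :: xs) r := by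
  induction r with
  | zero => intro xs c p hp; simpa [PySem.List.permutations_zero] using hp
  | succ r ih =>
    intro xs c p hp
    rw [pv_perms_succ_getD] at hp ⊢
    rw [List.mem_flatMap] at hp ⊢
    obtain ⟨i, hi, hmem⟩ := hp
    rw [List.mem_map] at hmem
    obtain ⟨q, hq, rfl⟩ := hmem
    refine ⟨i + 1, ?_, ?_⟩
    · simp only [List.mem_range, List.length_cons] at hi ⊢; omega
    · rw [List.mem_map]
      refine ⟨q, ?_, ?_⟩
      · rw [List.eraseIdx_cons_succ]
        exact ih _ c q hq
      · rw [List.getD_cons_succ]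

theorem pv_sublist_mem_perms {t s : List Char} (h : List.Sublist t s) :
    t ∈ PySem.List.permutations s t.length := by
  induction h with
  | slnil => simp [PySem.List.permutations_zero]
  | cons a h ih => exact pv_mem_perms_cons _ _ a _ ih
  | cons₂ a h ih =>
    rename_i l₁ l₂
    rw [List.length_cons, pv_perms_succ_getD, List.mem_flatMap]
    refine ⟨0, by simp, ?_⟩
    rw [List.mem_map]
    refine ⟨l₁, ?_, ?_⟩
    · simpa using ih
    · simp

theorem pv_pair_sublist {a b : Char} {s : List Char} (ha : a ∈ s) (hb : b ∈ s) (hne : a ≠ b) :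
    List.Sublist [a, b] s ∨ List.Sublist [b, a] s := by
  obtain ⟨u, v, rfl⟩ := List.append_of_mem ha
  rcases List.mem_append.mp hb with hbu | hbv
  · right
    have h1 : List.Sublist [b] u := List.singleton_sublist.mpr hbu
    have h2 : List.Sublist [a] (a :: v) := List.singleton_sublist.mpr (List.mem_cons_self ..)
    exact h1.append h2
  · left
    rcases List.mem_cons.mp hbv with rfl | hbv
    · exact absurd rfl hne
    · have h1 : List.Sublist [a, b] (a :: v) := (List.singleton_sublist.mpr hbv).cons₂ a
      exact h1.trans (List.sublist_append_right u _)

theorem pv_take_filter (q : Char → Bool) (s : List Char) (k : Nat) (h : k ≤ s.countP q) :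
    List.Sublist ((s.filter q).take k) s ∧ ((s.filter q).take k).length = k ∧ ∀ c ∈ (s.filter q).take k, q c := by
  refine ⟨((s.filter q).take_sublist k).trans (s.filter_sublist), ?_, ?_⟩
  · rw [List.length_take, List.countP_eq_length_filter] at *
    omega
  · intro c hc
    have := List.mem_of_mem_take hc
    exact (List.mem_filter.mp this).2

theorem pv_val_mem {t : List Char} {num : Int} (ht : List.Sublist t (PySem.Int.toChars num))
    (hne : t ≠ []) :
    pvParse t ∈ pvVals (PySem.Int.toChars num) (PySem.Int.toChars num).length := by
  have h1 : 1 ≤ t.length := by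
    cases t with
    | nil => exact absurd rfl hne
    | cons a t => simp
  have h2 : t.length ≤ (PySem.Int.toChars num).length := ht.length_le
  rw [pvVals, List.mem_flatMap]
  refine ⟨t.length - 1, by rw [List.mem_range]; omega, ?_⟩
  have hk : t.length - 1 + 1 = t.length := by omega
  rw [pvLvlVals, hk, List.mem_map]
  exact ⟨t, pv_sublist_mem_perms ht, rfl⟩

theorem pv_exists_mult (num : Int) (h : Pre_find_mult_3 num) :
    ∃ v ∈ pvVals (PySem.Int.toChars num) (PySem.Int.toChars num).length, pvP v := by
  obtain ⟨-, hcase⟩ := h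
  rcases hcase with h0 | ⟨h1, h2⟩ | h3 | h3'
  · obtain ⟨hsub, hlen, hall⟩ := pv_take_filter _ _ 1 h0
    obtain ⟨c, hc⟩ := List.length_eq_one_iff.mp hlen
    rw [hc] at hsub hall
    have hcmem : c ∈ ['0','3','6','9'] := by
      have := hall c (by simp)
      simpa using this
    refine ⟨pvParse [c], pv_val_mem hsub (by simp), ?_⟩
    fin_cases hcmem <;> decide
  · obtain ⟨hsub1, hlen1, hall1⟩ := pv_take_filter _ _ 1 h1
    obtain ⟨c1, hc1⟩ := List.length_eq_one_iff.mp hlen1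
    rw [hc1] at hsub1 hall1
    obtain ⟨hsub2, hlen2, hall2⟩ := pv_take_filter _ _ 1 h2
    obtain ⟨c2, hc2⟩ := List.length_eq_one_iff.mp hlen2
    rw [hc2] at hsub2 hall2
    have hm1 : c1 ∈ ['1','4','7'] := by have := hall1 c1 (by simp); simpa using this
    have hm2 : c2 ∈ ['2','5','8'] := by have := hall2 c2 (by simp); simpa using this
    have hs1 : c1 ∈ PySem.Int.toChars num := List.singleton_sublist.mp hsub1
    have hs2 : c2 ∈ PySem.Int.toChars num := List.singleton_sublist.mp hsub2
    have hne : c1 ≠ c2 := by fin_cases hm1 <;> fin_cases hm2 <;> decide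
    rcases pv_pair_sublist hs1 hs2 hne with hsub | hsub
    · refine ⟨pvParse [c1, c2], pv_val_mem hsub (by simp), ?_⟩
      fin_cases hm1 <;> fin_cases hm2 <;> decide
    · refine ⟨pvParse [c2, c1], pv_val_mem hsub (by simp), ?_⟩
      fin_cases hm1 <;> fin_cases hm2 <;> decide
  · obtain ⟨hsub, hlen, hall⟩ := pv_take_filter _ _ 3 h3
    obtain ⟨a, b, c, habc⟩ := List.length_eq_three.mp hlen
    rw [habc] at hsub hall
    have hma : a ∈ ['1','4','7'] := by have := hall a (by simp); simpa using this
    have hmb : b ∈ ['1','4','7'] := by have := hall b (by simp); simpa using this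
    have hmc : c ∈ ['1','4','7'] := by have := hall c (by simp); simpa using this
    refine ⟨pvParse [a, b, c], pv_val_mem hsub (by simp), ?_⟩
    fin_cases hma <;> fin_cases hmb <;> fin_cases hmc <;> decide
  · obtain ⟨hsub, hlen, hall⟩ := pv_take_filter _ _ 3 h3'
    obtain ⟨a, b, c, habc⟩ := List.length_eq_three.mp hlen
    rw [habc] at hsub hall
    have hma : a ∈ ['2','5','8'] := by have := hall a (by simp); simpa using this
    have hmb : b ∈ ['2','5','8'] := by have := hall b (by simp); simpa using this
    have hmc : c ∈ ['2','5','8'] := by have := hall c (by simp); simpa using this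
    refine ⟨pvParse [a, b, c], pv_val_mem hsub (by simp), ?_⟩
    fin_cases hma <;> fin_cases hmb <;> fin_cases hmc <;> decide

-- ===== VERDICT (by name: the statement is the Claim_ definition above) =====
theorem find_mult_3_spec : Claim_equal_find_mult_3 := by
  intro num _ hpre
  unfold Spec_find_mult_3
  obtain ⟨v, hv, hpv⟩ := pv_exists_mult num hpre
  have hne : (pvVals (PySem.Int.toChars num) (PySem.Int.toChars num).length).filter pvP ≠ [] := by
    intro hnil
    have : v ∈ (pvVals (PySem.Int.toChars num) (PySem.Int.toChars num).length).filter pvP :=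
      List.mem_filter.mpr ⟨hv, hpv⟩
    simp [hnil] at this
  obtain ⟨m, hm⟩ := Option.ne_none_iff_exists'.mp (mt List.getLast?_eq_none_iff.mp hne)
  rw [pv_A_eq, pv_B_eq, hm]
  simp [List.countP_eq_length_filter]
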